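-- pv_equiv track=rewrite | github.com/olsson-group/sma-md | utils/sort_atoms.py | find_first_references
-- ===== SOURCE A (Python) =====
-- def find_first_references(neighbors):
--     '''
--         Look for a path of, preferably, 4 nodes in a graph. If it doesn't exist, find the longest path.
--         Input:
--             - neighbors: list whose ith entry are the neighbours of node i.
--         Output:
--             - path
--             - path_length: if 0, the longest path is shorter than 3.
--
--     '''
--     #could be optimized to not repeat paths using sets.
--     path_length = 0
--     length_3_paths = []
--     for node_1 in range(len(neighbors)):
--         for node_2 in neighbors[node_1]:
--             for node_3 in neighbors[node_2]:
--                 if node_3 != node_1: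
--                     length_3_paths.append([node_1, node_2, node_3])
--                     path_length = 3
--                     for node_4 in neighbors[node_3]:
--                         if node_4 != node_2 and node_4 != node_1:
--                             path_length = 4
--                             return [node_1, node_2, node_3, node_4], path_length
--     for path in length_3_paths:
--         if len(neighbors[path[1]])==2:
--             return path, 3
--     return [], 0
-- ===== SOURCE B (Python) =====
-- def find_first_references(neighbors):
--     def triples():
--         return ((n1, n2, n3)
--                 for n1 in range(len(neighbors))
--                 for n2 in neighbors[n1]
--                 for n3 in neighbors[n2]
--                 if n3 != n1)
--     hit = next((([n1, n2, n3, n4], 4)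
--                 for (n1, n2, n3) in triples()
--                 for n4 in neighbors[n3]
--                 if n4 != n2 and n4 != n1), None)
--     if hit is not None:
--         return hit
--     return next((([n1, n2, n3], 3)
--                  for (n1, n2, n3) in triples()
--                  if len(neighbors[n2]) == 2), ([], 0))
-- ===== Notes on version B (the rewrite author's own statement) =====
-- stated objective: alternative
-- what changed: B replaces A's imperative nested loops with a mutable length_3_paths accumulator and a separate rescan by a stateless two-stage pipeline: a reusable triple generator consumed twice with next(), first for a 4-extension and then for the degree-2 fallback, so no path list or state is ever stored.
import Mathlib
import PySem

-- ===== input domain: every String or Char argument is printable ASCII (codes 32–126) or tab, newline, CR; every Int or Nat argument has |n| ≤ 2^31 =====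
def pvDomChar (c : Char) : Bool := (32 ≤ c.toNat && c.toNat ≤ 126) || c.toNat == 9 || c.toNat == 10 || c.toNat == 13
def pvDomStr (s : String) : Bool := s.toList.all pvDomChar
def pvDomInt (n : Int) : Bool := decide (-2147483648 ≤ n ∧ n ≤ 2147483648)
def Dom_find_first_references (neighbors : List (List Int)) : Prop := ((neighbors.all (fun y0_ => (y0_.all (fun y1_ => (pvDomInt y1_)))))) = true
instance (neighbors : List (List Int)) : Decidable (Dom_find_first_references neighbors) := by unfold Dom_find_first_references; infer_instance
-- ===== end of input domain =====

-- B replaces A's imperative loops with their mutable length_3_paths accumulator and rescan by a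
-- stateless two-stage pipeline over a reusable triple stream (objective: alternative; return value only).

-- ===== PORT A =====
-- inner 'for node_4 in neighbors[node_3]' loop with early return: first node_4 with node_4 != node_2 and node_4 != node_1
def ffrFind4 : List Int → Int → Int → Option Int
  | [], _, _ => none
  | n4 :: rest, n2, n1 => if n4 ≠ n2 ∧ n4 ≠ n1 then some n4 else ffrFind4 rest n2 n1

-- 'for node_3 in neighbors[node_2]' loop; state: length_3_paths; .inr = early return
def ffrLoop3 (nb : List (List Int)) (n1 n2 : Int) : List Int → List (List Int) → (List (List Int)) ⊕ (List Int × Int)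
  | [], acc => .inl acc
  | n3 :: rest, acc =>
    if n3 ≠ n1 then
      match ffrFind4 (PySem.List.pyGetD nb n3 []) n2 n1 with
      | some n4 => .inr ([n1, n2, n3, n4], 4)
      | none => ffrLoop3 nb n1 n2 rest (acc ++ [[n1, n2, n3]])
    else ffrLoop3 nb n1 n2 rest acc

def ffrLoop2 (nb : List (List Int)) (n1 : Int) : List Int → List (List Int) → (List (List Int)) ⊕ (List Int × Int)
  | [], acc => .inl acc
  | n2 :: rest, acc =>
    match ffrLoop3 nb n1 n2 (PySem.List.pyGetD nb n2 []) acc with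
    | .inr r => .inr r
    | .inl acc' => ffrLoop2 nb n1 rest acc'

def ffrLoop1 (nb : List (List Int)) : List Int → List (List Int) → (List (List Int)) ⊕ (List Int × Int)
  | [], acc => .inl acc
  | n1 :: rest, acc =>
    match ffrLoop2 nb n1 (PySem.List.pyGetD nb n1 []) acc with
    | .inr r => .inr r
    | .inl acc' => ffrLoop1 nb rest acc'

-- final 'for path in length_3_paths' loop
def ffrScan (nb : List (List Int)) : List (List Int) → List Int × Int
  | [] => ([], 0)
  | p :: rest =>
    if (PySem.List.pyGetD nb (PySem.List.pyGetD p 1 0) []).length = 2 then (p, 3)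
    else ffrScan nb rest

def find_first_references (neighbors : List (List Int)) : List Int × Int :=
  match ffrLoop1 neighbors (PySem.List.pyRange 0 neighbors.length 1) [] with
  | .inr r => r
  | .inl paths => ffrScan neighbors paths

-- ===== PORT B =====
-- the triple stream 'triples()': n1 over range, n2 over neighbors[n1], n3 over neighbors[n2] with n3 != n1
def ffrT3 (n1 n2 : Int) (l3 : List Int) : List (Int × Int × Int) :=
  l3.filterMap (fun n3 => if n3 ≠ n1 then some (n1, n2, n3) else none)

def ffrT2 (nb : List (List Int)) (n1 : Int) (l2 : List Int) : List (Int × Int × Int) :=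
  l2.flatMap (fun n2 => ffrT3 n1 n2 (PySem.List.pyGetD nb n2 []))

def ffrTriples (nb : List (List Int)) : List (Int × Int × Int) :=
  (PySem.List.pyRange 0 nb.length 1).flatMap (fun n1 => ffrT2 nb n1 (PySem.List.pyGetD nb n1 []))

-- stage 1: first 4-extension of a triple ('for n4 in neighbors[n3] if n4 != n2 and n4 != n1')
def ffrStep4 (nb : List (List Int)) (t : Int × Int × Int) : Option (List Int × Int) :=
  (PySem.List.pyGetD nb t.2.2 []).findSome?
    (fun n4 => if n4 ≠ t.2.1 ∧ n4 ≠ t.1 then some ([t.1, t.2.1, t.2.2, n4], 4) else none)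

-- stage 2: first triple whose middle node has exactly two neighbours
def ffrStep3 (nb : List (List Int)) (t : Int × Int × Int) : Option (List Int × Int) :=
  if (PySem.List.pyGetD nb t.2.1 []).length = 2 then some ([t.1, t.2.1, t.2.2], 3) else none

def find_first_references_alt (neighbors : List (List Int)) : List Int × Int :=
  match (ffrTriples neighbors).findSome? (ffrStep4 neighbors) with
  | some r => r
  | none =>
    match (ffrTriples neighbors).findSome? (ffrStep3 neighbors) with
    | some r => r
    | none => ([], 0)

-- ===== PRECONDITION & SPEC =====
-- Pre_ excludes exactly the inputs on which A raises IndexError: those where some out-of-range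
-- neighbour id is read (as node_2, or as a node_3 distinct from node_1) without a complete 4-path
-- occurring at an earlier position of the fixed enumeration order (node_1, then position of node_2,
-- then position of node_3) — a static graph/order condition on the input's entries.
def ffrIn (nb : List (List Int)) (x : Int) : Prop := -(nb.length : Int) ≤ x ∧ x < (nb.length : Int)
def ffrRow (nb : List (List Int)) (a : Nat) : List Int := nb.getD a []
def ffrN2 (nb : List (List Int)) (a b : Nat) : Int := (ffrRow nb a).getD b 0
def ffrAdj (nb : List (List Int)) (x : Int) : List Int := PySem.List.pyGetD nb x []
def ffrN3 (nb : List (List Int)) (a b c : Nat) : Int := (ffrAdj nb (ffrN2 nb a b)).getD c 0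
-- a complete 4-path starts at enumeration position (a, b, c)
def ffrGoodAt (nb : List (List Int)) (a b c : Nat) : Prop :=
  ffrIn nb (ffrN2 nb a b) ∧ ffrN3 nb a b c ≠ (a : Int) ∧ ffrIn nb (ffrN3 nb a b c) ∧
    ∃ n4 ∈ ffrAdj nb (ffrN3 nb a b c), n4 ≠ ffrN2 nb a b ∧ n4 ≠ (a : Int)
def ffrGoodBefore2 (nb : List (List Int)) (a b : Nat) : Prop :=
  ∃ a' < nb.length, ∃ b' < (ffrRow nb a').length, ∃ c' < (ffrAdj nb (ffrN2 nb a' b')).length,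
    ffrGoodAt nb a' b' c' ∧ (a' < a ∨ (a' = a ∧ b' < b))
def ffrGoodBefore3 (nb : List (List Int)) (a b c : Nat) : Prop :=
  ∃ a' < nb.length, ∃ b' < (ffrRow nb a').length, ∃ c' < (ffrAdj nb (ffrN2 nb a' b')).length,
    ffrGoodAt nb a' b' c' ∧ (a' < a ∨ (a' = a ∧ (b' < b ∨ (b' = b ∧ c' < c))))
def Pre_find_first_references (neighbors : List (List Int)) : Prop :=
  ∀ a < neighbors.length, ∀ b < (ffrRow neighbors a).length,
    (¬ ffrIn neighbors (ffrN2 neighbors a b) → ffrGoodBefore2 neighbors a b) ∧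
    ∀ c < (ffrAdj neighbors (ffrN2 neighbors a b)).length,
      ffrN3 neighbors a b c ≠ (a : Int) → ¬ ffrIn neighbors (ffrN3 neighbors a b c) →
        ffrGoodBefore3 neighbors a b c
instance (neighbors : List (List Int)) : Decidable (Pre_find_first_references neighbors) := by
  haveI hin : ∀ x, Decidable (ffrIn neighbors x) := fun x => by unfold ffrIn; infer_instance
  haveI hg : ∀ a b c, Decidable (ffrGoodAt neighbors a b c) := fun a b c => by
    unfold ffrGoodAt; infer_instance
  haveI h2 : ∀ a b, Decidable (ffrGoodBefore2 neighbors a b) := fun a b => by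
    unfold ffrGoodBefore2; infer_instance
  haveI h3 : ∀ a b c, Decidable (ffrGoodBefore3 neighbors a b c) := fun a b c => by
    unfold ffrGoodBefore3; infer_instance
  haveI hbody3 : ∀ a b c, Decidable (ffrN3 neighbors a b c ≠ (a : Int) →
      ¬ ffrIn neighbors (ffrN3 neighbors a b c) → ffrGoodBefore3 neighbors a b c) :=
    fun a b c => by infer_instance
  haveI hball3 : ∀ a b, Decidable (∀ c < (ffrAdj neighbors (ffrN2 neighbors a b)).length,
      ffrN3 neighbors a b c ≠ (a : Int) → ¬ ffrIn neighbors (ffrN3 neighbors a b c) →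
        ffrGoodBefore3 neighbors a b c) :=
    fun a b => Nat.decidableBallLT _ _
  haveI hbody2 : ∀ a b, Decidable ((¬ ffrIn neighbors (ffrN2 neighbors a b) →
        ffrGoodBefore2 neighbors a b) ∧
      ∀ c < (ffrAdj neighbors (ffrN2 neighbors a b)).length,
        ffrN3 neighbors a b c ≠ (a : Int) → ¬ ffrIn neighbors (ffrN3 neighbors a b c) →
          ffrGoodBefore3 neighbors a b c) :=
    fun a b => by infer_instance
  haveI hball2 : ∀ a, Decidable (∀ b < (ffrRow neighbors a).length,
      (¬ ffrIn neighbors (ffrN2 neighbors a b) → ffrGoodBefore2 neighbors a b) ∧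
      ∀ c < (ffrAdj neighbors (ffrN2 neighbors a b)).length,
        ffrN3 neighbors a b c ≠ (a : Int) → ¬ ffrIn neighbors (ffrN3 neighbors a b c) →
          ffrGoodBefore3 neighbors a b c) :=
    fun a => Nat.decidableBallLT _ _
  unfold Pre_find_first_references
  exact Nat.decidableBallLT _ _
def pvWitness_find_first_references : List (List Int) := [[1], [0]]
def Spec_find_first_references (neighbors : List (List Int)) (out : List Int × Int) : Prop := out = find_first_references_alt neighbors
instance (neighbors : List (List Int)) (out : List Int × Int) : Decidable (Spec_find_first_references neighbors out) := by unfold Spec_find_first_references; infer_instance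

-- ===== CLAIM (what is proved, stated in full; the proofs are below) =====
def Claim_equal_find_first_references : Prop := ∀ (neighbors : List (List Int)), Dom_find_first_references neighbors → Pre_find_first_references neighbors → Spec_find_first_references neighbors (find_first_references neighbors)

-- ===== LEMMAS AND PROOFS =====

lemma ffrFind4_findSome (l : List Int) (n2 n1 : Int) :
    ffrFind4 l n2 n1 = l.findSome? (fun n4 => if n4 ≠ n2 ∧ n4 ≠ n1 then some n4 else none) := by
  induction l with
  | nil => rfl
  | cons n4 rest ih =>
    simp only [ffrFind4, List.findSome?_cons]
    split_ifs with h <;> simp [ih]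

lemma ffrStep4_eq (nb : List (List Int)) (n1 n2 n3 : Int) :
    ffrStep4 nb (n1, n2, n3) =
      (ffrFind4 (PySem.List.pyGetD nb n3 []) n2 n1).map (fun n4 => ([n1, n2, n3, n4], 4)) := by
  simp only [ffrStep4, ffrFind4_findSome]
  induction (PySem.List.pyGetD nb n3 []) with
  | nil => rfl
  | cons x rest ih =>
    simp only [List.findSome?_cons]
    split_ifs with h <;> simp [ih]

lemma ffrLoop3_eq (nb : List (List Int)) (n1 n2 : Int) (l3 : List Int) (acc : List (List Int)) :
    ffrLoop3 nb n1 n2 l3 acc =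
      match (ffrT3 n1 n2 l3).findSome? (ffrStep4 nb) with
      | some r => .inr r
      | none => .inl (acc ++ (ffrT3 n1 n2 l3).map (fun t => [t.1, t.2.1, t.2.2])) := by
  induction l3 generalizing acc with
  | nil => simp [ffrLoop3, ffrT3]
  | cons n3 rest ih =>
    by_cases h : n3 = n1
    · simp only [ffrLoop3, ffrT3, List.filterMap_cons, h, ne_eq, not_true_eq_false, if_false]
      exact ih acc
    · simp only [ffrLoop3, ffrT3, List.filterMap_cons, ne_eq, if_pos h, h, not_false_eq_true,
        if_true, List.findSome?_cons, ffrStep4_eq]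
      cases hf : ffrFind4 (PySem.List.pyGetD nb n3 []) n2 n1 with
      | some n4 => simp
      | none =>
        simp only [Option.map_none]
        have := ih (acc ++ [[n1, n2, n3]])
        simp only [ffrT3] at this
        rw [this]
        cases (List.filterMap (fun n3 => if n3 ≠ n1 then some (n1, n2, n3) else none) rest).findSome? (ffrStep4 nb) <;> simp

lemma ffrLoop2_eq (nb : List (List Int)) (n1 : Int) (l2 : List Int) (acc : List (List Int)) :
    ffrLoop2 nb n1 l2 acc =
      match (ffrT2 nb n1 l2).findSome? (ffrStep4 nb) with
      | some r => .inr r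
      | none => .inl (acc ++ (ffrT2 nb n1 l2).map (fun t => [t.1, t.2.1, t.2.2])) := by
  induction l2 generalizing acc with
  | nil => simp [ffrLoop2, ffrT2]
  | cons n2 rest ih =>
    simp only [ffrLoop2, ffrT2, List.flatMap_cons, List.findSome?_append, List.map_append,
      ffrLoop3_eq]
    cases h3 : (ffrT3 n1 n2 (PySem.List.pyGetD nb n2 [])).findSome? (ffrStep4 nb) with
    | some r => simp
    | none =>
      simp only
      have := ih (acc ++ (ffrT3 n1 n2 (PySem.List.pyGetD nb n2 [])).map (fun t => [t.1, t.2.1, t.2.2]))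
      simp only [ffrT2] at this
      rw [this]
      cases (rest.flatMap (fun n2 => ffrT3 n1 n2 (PySem.List.pyGetD nb n2 []))).findSome? (ffrStep4 nb) <;>
        simp

lemma ffrLoop1_eq (nb : List (List Int)) (l1 : List Int) (acc : List (List Int)) :
    ffrLoop1 nb l1 acc =
      match (l1.flatMap (fun n1 => ffrT2 nb n1 (PySem.List.pyGetD nb n1 []))).findSome? (ffrStep4 nb) with
      | some r => .inr r
      | none => .inl (acc ++ (l1.flatMap (fun n1 => ffrT2 nb n1 (PySem.List.pyGetD nb n1 []))).map
          (fun t => [t.1, t.2.1, t.2.2])) := by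
  induction l1 generalizing acc with
  | nil => simp [ffrLoop1]
  | cons n1 rest ih =>
    simp only [ffrLoop1, List.flatMap_cons, List.findSome?_append, List.map_append, ffrLoop2_eq]
    cases h2 : (ffrT2 nb n1 (PySem.List.pyGetD nb n1 [])).findSome? (ffrStep4 nb) with
    | some r => simp
    | none =>
      simp only
      rw [ih (acc ++ (ffrT2 nb n1 (PySem.List.pyGetD nb n1 [])).map (fun t => [t.1, t.2.1, t.2.2]))]
      cases (rest.flatMap (fun n1 => ffrT2 nb n1 (PySem.List.pyGetD nb n1 []))).findSome? (ffrStep4 nb) <;>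
        simp

lemma ffrScan_eq (nb : List (List Int)) (ts : List (Int × Int × Int)) :
    ffrScan nb (ts.map (fun t => [t.1, t.2.1, t.2.2])) =
      match ts.findSome? (ffrStep3 nb) with
      | some r => r
      | none => ([], 0) := by
  induction ts with
  | nil => rfl
  | cons t rest ih =>
    simp only [List.map_cons, ffrScan, List.findSome?_cons, ffrStep3]
    have hmid : PySem.List.pyGetD [t.1, t.2.1, t.2.2] 1 0 = t.2.1 := by
      simp [PySem.List.pyGetD, PySem.List.pyGet?, PySem.List.pyIdx?]
    rw [hmid]
    split_ifs with h <;> simp [ih]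

-- ===== VERDICT (by name: the statement is the Claim_ definition above) =====
theorem find_first_references_spec : Claim_equal_find_first_references := by
  intro nb _ _
  show find_first_references nb = find_first_references_alt nb
  unfold find_first_references find_first_references_alt
  rw [ffrLoop1_eq]
  show _ = match (ffrTriples nb).findSome? (ffrStep4 nb) with
    | some r => r
    | none => match (ffrTriples nb).findSome? (ffrStep3 nb) with
      | some r => r
      | none => ([], 0)
  unfold ffrTriples
  cases h4 : ((PySem.List.pyRange 0 nb.length 1).flatMap
      (fun n1 => ffrT2 nb n1 (PySem.List.pyGetD nb n1 []))).findSome? (ffrStep4 nb) with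
  | some r => simp
  | none =>
    simp only [List.nil_append]
    rw [ffrScan_eq]
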